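-- pv_equiv track=rewrite | github.com/nermadie/CodeForces_Solutions | CodeforcesRound1037Div3/prob02.py | solve
-- ===== SOURCE A (Python) =====
-- def solve(n, k, a):
--     cur_k = k
--     result = 0
--     i = 0
--     while i < n:
--         if a[i] == 0:
--             cur_k -= 1
--             if cur_k == 0:
--                 result += 1
--                 i += 1
--                 cur_k = k
--         else:
--             cur_k = k
--         i += 1
--
--     return result
-- ===== SOURCE B (Python) =====
-- def solve(n, k, a):
--     # Run-length reformulation: each maximal run of m zeros contributes
--     # (m + 1) // (k + 1) completed groups (the +1 accounts for the skipped
--     # element after each completed group).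
--     if k <= 0:
--         return 0
--     total = 0
--     run = 0
--     for x in a[:max(n, 0)]:
--         if x == 0:
--             run += 1
--         else:
--             total += (run + 1) // (k + 1)
--             run = 0
--     return total + (run + 1) // (k + 1)
-- ===== Notes on version B (the rewrite author's own statement) =====
-- stated objective: alternative
-- what changed: Replaces A's stateful countdown-with-index-skip while loop by a single pass that accumulates zero-run lengths and adds the closed form (run+1)//(k+1) per maximal run, with an explicit k<=0 guard.
-- outside the precondition, e.g. on solve(2, 1, [0]): A returns 1, B returns 1; on solve(1, 1, []): A raises IndexError, B returns 0
import Mathlib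
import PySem

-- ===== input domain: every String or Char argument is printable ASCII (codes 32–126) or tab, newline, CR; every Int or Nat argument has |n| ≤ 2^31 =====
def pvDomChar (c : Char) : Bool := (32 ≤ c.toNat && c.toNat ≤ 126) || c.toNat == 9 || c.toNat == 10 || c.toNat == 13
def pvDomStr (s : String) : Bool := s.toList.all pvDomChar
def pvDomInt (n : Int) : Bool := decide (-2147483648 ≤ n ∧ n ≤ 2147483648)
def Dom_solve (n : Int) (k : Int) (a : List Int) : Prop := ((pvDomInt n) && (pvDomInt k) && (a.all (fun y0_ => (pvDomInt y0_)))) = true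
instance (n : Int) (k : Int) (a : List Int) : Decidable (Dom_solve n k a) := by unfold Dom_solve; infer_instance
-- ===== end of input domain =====

-- B replaces A's stateful countdown loop with skip-index by one pass over zero-run
-- lengths, adding the closed form (run+1)//(k+1) per maximal run ('alternative').

-- ===== PORT A =====
-- while i < n: … (pyGetD is a[i]; Pre_solve guarantees the index is in range)
def solveA_loop (n k : Int) (a : List Int) (i cur_k result : Int) : Int :=
  if _h : i < n then
    if PySem.List.pyGetD a i 0 = 0 then
      if cur_k - 1 = 0 then
        solveA_loop n k a (i + 2) k (result + 1)
      else
        solveA_loop n k a (i + 1) (cur_k - 1) result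
    else
      solveA_loop n k a (i + 1) k result
  else
    result
termination_by (n - i).toNat
decreasing_by all_goals omega

def solve (n : Int) (k : Int) (a : List Int) : Int :=
  solveA_loop n k a 0 k 0

-- ===== PORT B =====
-- fold state (total, run) over a[:max(n,0)]
def solveB_step (k : Int) (st : Int × Int) (x : Int) : Int × Int :=
  if x = 0 then (st.1, st.2 + 1)
  else (st.1 + PySem.Int.floordiv (st.2 + 1) (k + 1), 0)

def solve_alt (n : Int) (k : Int) (a : List Int) : Int :=
  if k ≤ 0 then 0
  else
    let p := (PySem.List.slice a none (some (max n 0))).foldl (solveB_step k) (0, 0)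
    p.1 + PySem.Int.floordiv (p.2 + 1) (k + 1)

-- ===== PRECONDITION & SPEC =====
-- Pre_ excludes n > len(a): n is the array's declared length, and beyond it A
-- usually raises IndexError (and returns at all only via its skip-index accident).
def Pre_solve (n : Int) (k : Int) (a : List Int) : Prop := n ≤ (a.length : Int)
instance (n : Int) (k : Int) (a : List Int) : Decidable (Pre_solve n k a) := by
  unfold Pre_solve; infer_instance

def pvWitness_solve : Int × Int × List Int := (6, 2, [0, 0, 0, 1, 0, 0])

def Spec_solve (n : Int) (k : Int) (a : List Int) (out : Int) : Prop := out = solve_alt n k a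
instance (n : Int) (k : Int) (a : List Int) (out : Int) : Decidable (Spec_solve n k a out) := by
  unfold Spec_solve; infer_instance

-- ===== CLAIM (what is proved, stated in full; the proofs are below) =====
def Claim_equal_solve : Prop := ∀ (n : Int) (k : Int) (a : List Int), Dom_solve n k a → Pre_solve n k a → Spec_solve n k a (solve n k a)

-- ===== LEMMAS AND PROOFS =====

-- B's per-run count, as a structural recursion with run-in-progress state r.
def Bc (k : Int) : List Int → Int → Int
  | [], r => PySem.Int.floordiv (r + 1) (k + 1)
  | x :: l, r =>
      if x = 0 then Bc k l (r + 1)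
      else PySem.Int.floordiv (r + 1) (k + 1) + Bc k l 0

lemma floordiv_small {x b : Int} (h0 : 0 ≤ x) (hb : x < b) :
    PySem.Int.floordiv x b = 0 := by
  rw [PySem.Int.floordiv_eq_ediv_of_pos (by omega)]
  exact Int.ediv_eq_zero_of_lt h0 hb

lemma fold_eq_Bc (k : Int) :
    ∀ (l : List Int) (t r : Int),
      (l.foldl (solveB_step k) (t, r)).1 +
        PySem.Int.floordiv ((l.foldl (solveB_step k) (t, r)).2 + 1) (k + 1)
      = t + Bc k l r := by
  intro l
  induction l with
  | nil => intro t r; simp [Bc]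
  | cons x l ih =>
      intro t r
      by_cases hx : x = 0
      · simp [List.foldl_cons, solveB_step, hx, Bc, ih]
      · simp only [List.foldl_cons, solveB_step, if_neg hx, Bc]
        rw [ih]
        ring

lemma Bc_shift (k : Int) (hk : 1 ≤ k) :
    ∀ (l : List Int) (r : Int), Bc k l (r + (k + 1)) = Bc k l r + 1 := by
  intro l
  induction l with
  | nil =>
      intro r
      simp only [Bc]
      have h : r + (k + 1) + 1 = (r + 1) + 1 * (k + 1) := by ring
      rw [h, PySem.Int.floordiv_eq_ediv_of_pos (by omega),
          PySem.Int.floordiv_eq_ediv_of_pos (by omega),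
          Int.add_mul_ediv_right _ _ (by omega : k + 1 ≠ 0)]
  | cons x l ih =>
      intro r
      by_cases hx : x = 0
      · simp only [Bc, if_pos hx]
        have h : r + (k + 1) + 1 = (r + 1) + (k + 1) := by ring
        rw [h, ih]
      · simp only [Bc, if_neg hx]
        have h : r + (k + 1) + 1 = (r + 1) + 1 * (k + 1) := by ring
        rw [h, PySem.Int.floordiv_eq_ediv_of_pos (by omega),
            PySem.Int.floordiv_eq_ediv_of_pos (by omega),
            Int.add_mul_ediv_right _ _ (by omega : k + 1 ≠ 0)]
        ring

lemma Bc_skip (k : Int) (hk : 1 ≤ k) (l : List Int) :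
    Bc k l k = 1 + Bc k l.tail 0 := by
  cases l with
  | nil =>
      simp only [Bc, List.tail_nil]
      rw [PySem.Int.floordiv_eq_ediv_of_pos (by omega),
          Int.ediv_self (by omega : k + 1 ≠ 0),
          floordiv_small (by omega : (0:Int) ≤ 0 + 1) (by omega)]
      omega
  | cons y l =>
      by_cases hy : y = 0
      · simp only [Bc, if_pos hy, List.tail_cons]
        have h : k + 1 = 0 + (k + 1) := by ring
        rw [h, Bc_shift k hk]
        ring
      · simp only [Bc, if_neg hy, List.tail_cons]
        rw [PySem.Int.floordiv_eq_ediv_of_pos (by omega),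
            Int.ediv_self (by omega : k + 1 ≠ 0)]

-- loop invariant for A with k ≥ 1: remaining count = Bc of the remaining suffix
lemma loopA_eq (k : Int) (hk : 1 ≤ k) (a : List Int) (n : Int)
    (hn : n ≤ (a.length : Int)) :
    ∀ (m : Nat) (i cur_k result : Int), (n - i).toNat = m → 0 ≤ i →
      1 ≤ cur_k → cur_k ≤ k →
      solveA_loop n k a i cur_k result
        = result + Bc k ((a.take n.toNat).drop i.toNat) (k - cur_k) := by
  intro m
  induction m using Nat.strong_induction_on with
  | _ m ih =>
    intro i cur_k result hm hi h1 h2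
    rw [solveA_loop]
    by_cases h : i < n
    · have hia : i.toNat < a.length := by omega
      have hit : i.toNat < (a.take n.toNat).length := by
        rw [List.length_take]; omega
      have hcons : (a.take n.toNat).drop i.toNat
          = a[i.toNat] :: (a.take n.toNat).drop (i.toNat + 1) := by
        rw [List.drop_eq_getElem_cons hit, List.getElem_take]
      rw [dif_pos h, PySem.List.pyGetD_eq_getElem a 0 hi (by omega)]
      by_cases hz : a[i.toNat] = 0
      · rw [if_pos hz]
        by_cases hck : cur_k - 1 = 0
        · rw [if_pos hck]
          have hi2 : (i + 2).toNat = i.toNat + 2 := by omega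
          rw [ih (n - (i + 2)).toNat (by omega) (i + 2) k (result + 1) rfl
                (by omega) hk le_rfl]
          rw [hcons, hi2]
          have hc1 : cur_k = 1 := by omega
          simp only [Bc, if_pos hz, hc1]
          have : k - 1 + 1 = k := by ring
          rw [this, Bc_skip k hk, List.tail_drop]
          have : k - k = 0 := by ring
          rw [this]
          ring
        · rw [if_neg hck]
          have hi1 : (i + 1).toNat = i.toNat + 1 := by omega
          rw [ih (n - (i + 1)).toNat (by omega) (i + 1) (cur_k - 1) result rfl
                (by omega) (by omega) (by omega)]
          rw [hcons, hi1]
          simp only [Bc, if_pos hz]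
          have : k - cur_k + 1 = k - (cur_k - 1) := by ring
          rw [this]
      · rw [if_neg hz]
        have hi1 : (i + 1).toNat = i.toNat + 1 := by omega
        rw [ih (n - (i + 1)).toNat (by omega) (i + 1) k result rfl
              (by omega) hk le_rfl]
        rw [hcons, hi1]
        simp only [Bc, if_neg hz]
        rw [floordiv_small (by omega : (0:Int) ≤ k - cur_k + 1) (by omega)]
        have : k - k = 0 := by ring
        rw [this]
        ring
    · rw [dif_neg h]
      have hnil : (a.take n.toNat).drop i.toNat = [] := by
        apply List.drop_eq_nil_of_le
        rw [List.length_take]; omega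
      rw [hnil]
      simp only [Bc]
      rw [floordiv_small (by omega : (0:Int) ≤ k - cur_k + 1) (by omega)]
      ring

-- with k ≤ 0, cur_k can never reach 1, so A never counts
lemma loopA_nonpos (k : Int) (hk : k ≤ 0) (a : List Int) (n : Int) :
    ∀ (m : Nat) (i cur_k result : Int), (n - i).toNat = m → cur_k ≤ k →
      solveA_loop n k a i cur_k result = result := by
  intro m
  induction m using Nat.strong_induction_on with
  | _ m ih =>
    intro i cur_k result hm hc
    rw [solveA_loop]
    by_cases h : i < n
    · rw [dif_pos h]
      by_cases hz : PySem.List.pyGetD a i 0 = 0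
      · rw [if_pos hz, if_neg (by omega : ¬ cur_k - 1 = 0)]
        exact ih (n - (i + 1)).toNat (by omega) _ _ _ rfl (by omega)
      · rw [if_neg hz]
        exact ih (n - (i + 1)).toNat (by omega) _ _ _ rfl le_rfl
    · rw [dif_neg h]

-- ===== VERDICT (by name: the statement is the Claim_ definition above) =====
theorem solve_spec : Claim_equal_solve := by
  intro n k a _dom hpre
  unfold Spec_solve solve solve_alt
  by_cases hk : k ≤ 0
  · rw [if_pos hk, loopA_nonpos k hk a n (n - 0).toNat 0 k 0 rfl le_rfl]
  · rw [if_neg hk]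
    have hk1 : 1 ≤ k := by omega
    have hmax : max n 0 = ((n.toNat : Nat) : Int) := by
      rw [Int.toNat_eq_max]
    rw [hmax, PySem.List.slice_to_natCast,
        loopA_eq k hk1 a n hpre (n - 0).toNat 0 k 0 rfl le_rfl hk1 le_rfl,
        fold_eq_Bc k (a.take n.toNat) 0 0]
    simp only [Int.toNat_zero, List.drop_zero, sub_self, zero_add]
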